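-- pv_equiv track=rewrite | github.com/hym0405/RNaseH_depletion | 1.calculate_probe_identity.py | findProbeMap
-- ===== SOURCE A (Python) =====
-- def findProbeMap(alignment_seq, original_seq, probe_set):
--     probeLength_list = [len(e) for e in probe_set]
--     probeIndex_original = []
--     for i in range(len(probeLength_list)):
--         for j in range(probeLength_list[i]):
--             probeIndex_original.append(i)
--     probeIndex_alignment = []
--     probeLength_alignment = []
--     for e in probeLength_list:
--         probeLength_alignment.append(0)
--     index = 0
--     for e in alignment_seq:
--         probeIndex_alignment.append(probeIndex_original[index])
--         probeLength_alignment[probeIndex_original[index]] += 1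
--         if e != "-":
--             index += 1
--     return probeIndex_alignment, probeLength_alignment
-- ===== SOURCE B (Python) =====
-- def findProbeMap(alignment_seq, original_seq, probe_set):
--     probeLength_list = [len(e) for e in probe_set]
--     probeIndex_alignment = []
--     probeLength_alignment = [0] * len(probeLength_list)
--     p = 0       # current probe index
--     base = 0    # start offset (in original coordinates) of probe p
--     index = 0   # number of non-gap characters consumed so far
--     for ch in alignment_seq:
--         while p < len(probeLength_list) and index >= base + probeLength_list[p]:
--             base += probeLength_list[p]
--             p += 1
--         if p >= len(probeLength_list):
--             raise IndexError("alignment has more bases than the probes cover")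
--         probeIndex_alignment.append(p)
--         probeLength_alignment[p] += 1
--         if ch != "-":
--             index += 1
--     return probeIndex_alignment, probeLength_alignment
-- ===== Notes on version B (the rewrite author's own statement) =====
-- stated objective: simpler
-- what changed: Replaces the precomputed position-to-probe expansion list (one entry per base of every probe) with a running cursor: a current probe index and its base offset, advanced across probe boundaries by a while loop, so no index list proportional to the total probe length is ever built.
import Mathlib
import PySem

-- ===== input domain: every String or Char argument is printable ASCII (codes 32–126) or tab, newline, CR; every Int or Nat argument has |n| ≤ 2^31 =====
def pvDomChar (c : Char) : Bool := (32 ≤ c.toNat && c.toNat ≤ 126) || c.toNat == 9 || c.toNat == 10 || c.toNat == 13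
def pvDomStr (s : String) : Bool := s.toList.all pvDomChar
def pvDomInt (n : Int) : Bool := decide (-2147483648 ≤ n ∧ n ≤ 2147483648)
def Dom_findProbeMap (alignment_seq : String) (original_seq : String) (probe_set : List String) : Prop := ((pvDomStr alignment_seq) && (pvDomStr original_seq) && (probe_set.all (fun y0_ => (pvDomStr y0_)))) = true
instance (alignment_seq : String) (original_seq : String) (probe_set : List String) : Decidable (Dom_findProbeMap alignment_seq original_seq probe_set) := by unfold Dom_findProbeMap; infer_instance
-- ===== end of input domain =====

-- B replaces A's precomputed base-position→probe expansion list with a running probe cursor (index + base offset); same return value on Pre_, simpler and without the O(total probe length) auxiliary list.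


-- ===== PORT A =====
-- helper for Python's `lst[i] += 1` at an in-range nonnegative index (exact there)
def pvIncAt (l : List Int) (i : Nat) : List Int :=
  l.set i ((l.getD i 0) + 1)

def findProbeMap (alignment_seq : String) (original_seq : String) (probe_set : List String) : List Int × List Int :=
  let probeLength_list : List Int := probe_set.map (fun e => PySem.Str.len e)
  let probeIndex_original : List Int :=
    (List.range probeLength_list.length).foldl
      (fun acc i => acc ++ (List.range (probeLength_list.getD i 0).toNat).map (fun _ => (i : Int))) []
  let probeLength_alignment : List Int := probeLength_list.map (fun _ => (0 : Int))
  let res := alignment_seq.toList.foldl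
    (fun (st : List Int × List Int × Int) e =>
      let v : Int := (PySem.List.pyGet? probeIndex_original st.2.2).getD 0
      (st.1 ++ [v], pvIncAt st.2.1 v.toNat, if e != '-' then st.2.2 + 1 else st.2.2))
    ([], probeLength_alignment, 0)
  (res.1, res.2.1)

-- ===== PORT B =====
-- the `while` cursor advance of B: skip probes whose span ends at or before `index`
def pvAdvance (pll : List Int) (p : Nat) (base index : Int) : Nat × Int :=
  if h : p < pll.length ∧ base + pll.getD p 0 ≤ index then
    pvAdvance pll (p + 1) (base + pll.getD p 0) index
  else
    (p, base)
termination_by pll.length - p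
decreasing_by omega

def findProbeMap_alt (alignment_seq : String) (original_seq : String) (probe_set : List String) : List Int × List Int :=
  let probeLength_list : List Int := probe_set.map (fun e => PySem.Str.len e)
  let res := alignment_seq.toList.foldl
    (fun (st : List Int × List Int × Nat × Int × Int) ch =>
      let pb := pvAdvance probeLength_list st.2.2.1 st.2.2.2.1 st.2.2.2.2
      -- (Python B raises IndexError here when pb.1 ≥ probeLength_list.length; excluded by Pre_)
      (st.1 ++ [(pb.1 : Int)], pvIncAt st.2.1 pb.1,
        pb.1, pb.2, if ch != '-' then st.2.2.2.2 + 1 else st.2.2.2.2))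
    ([], probeLength_list.map (fun _ => (0 : Int)), 0, 0, 0)
  (res.1, res.2.1)

-- ===== PRECONDITION & SPEC =====
-- Pre_ excludes exactly the inputs on which Python A raises IndexError (when the number of
-- non-gap characters strictly before the last alignment character reaches the total probe
-- length); Python B raises IndexError on the same inputs.
def Pre_findProbeMap (alignment_seq : String) (original_seq : String) (probe_set : List String) : Prop :=
  alignment_seq.toList = [] ∨
    ((alignment_seq.toList.dropLast.filter (fun c => c != '-')).length : Int) <
      (probe_set.map (fun e => PySem.Str.len e)).sum

instance (alignment_seq : String) (original_seq : String) (probe_set : List String) : Decidable (Pre_findProbeMap alignment_seq original_seq probe_set) := by unfold Pre_findProbeMap; infer_instance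

def pvWitness_findProbeMap : String × String × List String := ("AC-G", "ACG", ["AC", "", "GT"])

def Spec_findProbeMap (alignment_seq : String) (original_seq : String) (probe_set : List String) (out : List Int × List Int) : Prop := out = findProbeMap_alt alignment_seq original_seq probe_set
instance (alignment_seq : String) (original_seq : String) (probe_set : List String) (out : List Int × List Int) : Decidable (Spec_findProbeMap alignment_seq original_seq probe_set out) := by unfold Spec_findProbeMap; infer_instance

-- ===== CLAIM (what is proved, stated in full; the proofs are below) =====
def Claim_equal_findProbeMap : Prop := ∀ (alignment_seq : String) (original_seq : String) (probe_set : List String), Dom_findProbeMap alignment_seq original_seq probe_set → Pre_findProbeMap alignment_seq original_seq probe_set → Spec_findProbeMap alignment_seq original_seq probe_set (findProbeMap alignment_seq original_seq probe_set)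

-- ===== LEMMAS AND PROOFS =====

-- the expansion list A builds, by structural recursion with a running first index `off`
def pvFlatFrom : List Int → Nat → List Int
  | [], _ => []
  | x :: t, off => List.replicate x.toNat ((off : Nat) : Int) ++ pvFlatFrom t (off + 1)

theorem pvFlatMap_eq_flatFrom (pll : List Int) (off : Nat) :
    (List.range pll.length).flatMap
      (fun i => List.replicate (pll.getD i 0).toNat ((off + i : Nat) : Int)) =
    pvFlatFrom pll off := by
  induction pll generalizing off with
  | nil => simp [pvFlatFrom]
  | cons x t ih =>
    simp only [List.length_cons, List.range_succ_eq_map, List.flatMap_cons, List.flatMap_map]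
    rw [pvFlatFrom]
    congr 1
    · rw [← ih (off + 1)]
      congr 1
      funext a
      have h1 : off + a.succ = off + 1 + a := by omega
      rw [h1]
      rfl

theorem pvBuild_eq (pll : List Int) :
    (List.range pll.length).foldl
      (fun acc i => acc ++ (List.range (pll.getD i 0).toNat).map (fun _ => (i : Int))) [] =
    pvFlatFrom pll 0 := by
  rw [PySem.List.foldl_append_eq_flatMap, List.nil_append, ← pvFlatMap_eq_flatFrom pll 0]
  congr 1
  funext i
  simp

theorem pvFlatFrom_get (pll : List Int) (p : Nat) (c : Int) (off : Nat)
    (hnn : ∀ x ∈ pll, 0 ≤ x) (hp : p < pll.length)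
    (h1 : (pll.take p).sum ≤ c) (h2 : c < (pll.take p).sum + pll.getD p 0) :
    PySem.List.pyGet? (pvFlatFrom pll off) c = some ((off + p : Nat) : Int) := by
  induction pll generalizing p c off with
  | nil => simp at hp
  | cons x t ih =>
    have hx : 0 ≤ x := hnn x (by simp)
    have h0c : 0 ≤ c := le_trans (List.sum_nonneg (fun y hy =>
      hnn y (List.mem_of_mem_take hy))) h1
    rw [PySem.List.pyGet?_of_nonneg _ h0c, pvFlatFrom]
    cases p with
    | zero =>
      simp only [List.take_zero, List.sum_nil, List.getD_cons_zero] at h1 h2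
      rw [List.getElem?_append_left (by
        simp only [List.length_replicate]; omega)]
      rw [List.getElem?_replicate]
      simp only [if_pos (by omega : c.toNat < x.toNat)]
      norm_num
    | succ q =>
      simp only [List.take_succ_cons, List.sum_cons, List.getD_cons_succ] at h1 h2
      have hS : 0 ≤ (t.take q).sum := List.sum_nonneg (fun y hy =>
        hnn y (by exact List.mem_cons_of_mem _ (List.mem_of_mem_take hy)))
      have hxc : x ≤ c := by omega
      rw [List.getElem?_append_right (by simp only [List.length_replicate]; omega)]
      have hq : q < t.length := by simpa using hp
      have := ih (fun y hy => hnn y (List.mem_cons_of_mem _ hy)) (off := off + 1)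
        (p := q) (c := c - x) hq (by omega) (by omega)
      rw [PySem.List.pyGet?_of_nonneg _ (by omega)] at this
      have hidx : c.toNat - (List.replicate x.toNat ((off : Nat) : Int)).length = (c - x).toNat := by
        simp only [List.length_replicate]; omega
      rw [hidx, this]
      congr 2
      omega

theorem pvAdvance_eq (pll : List Int) (p : Nat) (base c : Int)
    (hnn : ∀ x ∈ pll, 0 ≤ x) (hp : p ≤ pll.length) (hbase : base = (pll.take p).sum)
    (hbc : base ≤ c) (hc : c < pll.sum) :
    (pvAdvance pll p base c).1 < pll.length ∧
    (pvAdvance pll p base c).2 = (pll.take (pvAdvance pll p base c).1).sum ∧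
    (pvAdvance pll p base c).2 ≤ c ∧
    c < (pvAdvance pll p base c).2 + pll.getD (pvAdvance pll p base c).1 0 := by
  rw [pvAdvance]
  by_cases h : p < pll.length ∧ base + pll.getD p 0 ≤ c
  · rw [dif_pos h]
    refine pvAdvance_eq pll (p + 1) (base + pll.getD p 0) c hnn h.1 ?_ h.2 hc
    rw [hbase, List.sum_take_succ _ _ h.1]
    congr 1
    exact List.getD_eq_getElem _ _ h.1
  · rw [dif_neg h]
    push Not at h
    have hplen : p < pll.length := by
      rcases lt_or_eq_of_le hp with h' | h'
      · exact h'
      · exfalso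
        rw [h', List.take_length] at hbase
        omega
    exact ⟨hplen, hbase, hbc, h hplen⟩
termination_by pll.length - p
decreasing_by omega

theorem pvLoop_eq (pll : List Int) (hnn : ∀ x ∈ pll, 0 ≤ x) :
    ∀ (chars : List Char) (pia pla : List Int) (c : Int) (p : Nat) (base : Int),
    p ≤ pll.length → base = (pll.take p).sum → base ≤ c →
    (chars = [] ∨ c + ((chars.dropLast.filter (fun ch => ch != '-')).length : Int) < pll.sum) →
    (chars.foldl
      (fun (st : List Int × List Int × Int) e =>
        let v : Int := (PySem.List.pyGet? (pvFlatFrom pll 0) st.2.2).getD 0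
        (st.1 ++ [v], pvIncAt st.2.1 v.toNat, if e != '-' then st.2.2 + 1 else st.2.2))
      (pia, pla, c)).1 =
    (chars.foldl
      (fun (st : List Int × List Int × Nat × Int × Int) ch =>
        let pb := pvAdvance pll st.2.2.1 st.2.2.2.1 st.2.2.2.2
        (st.1 ++ [(pb.1 : Int)], pvIncAt st.2.1 pb.1,
          pb.1, pb.2, if ch != '-' then st.2.2.2.2 + 1 else st.2.2.2.2))
      (pia, pla, p, base, c)).1 ∧
    (chars.foldl
      (fun (st : List Int × List Int × Int) e =>
        let v : Int := (PySem.List.pyGet? (pvFlatFrom pll 0) st.2.2).getD 0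
        (st.1 ++ [v], pvIncAt st.2.1 v.toNat, if e != '-' then st.2.2 + 1 else st.2.2))
      (pia, pla, c)).2.1 =
    (chars.foldl
      (fun (st : List Int × List Int × Nat × Int × Int) ch =>
        let pb := pvAdvance pll st.2.2.1 st.2.2.2.1 st.2.2.2.2
        (st.1 ++ [(pb.1 : Int)], pvIncAt st.2.1 pb.1,
          pb.1, pb.2, if ch != '-' then st.2.2.2.2 + 1 else st.2.2.2.2))
      (pia, pla, p, base, c)).2.1 := by
  intro chars
  induction chars with
  | nil => intro pia pla c p base _ _ _ _; exact ⟨rfl, rfl⟩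
  | cons ch rest ih =>
    intro pia pla c p base hp hbase hbc hfit
    have hcsum : c < pll.sum := by
      rcases hfit with h | h
      · simp at h
      · omega
    obtain ⟨hlt, hb', hbc', hcub⟩ := pvAdvance_eq pll p base c hnn hp hbase hbc hcsum
    have hget := pvFlatFrom_get pll (pvAdvance pll p base c).1 c 0 hnn hlt
      (by omega) (by omega)
    simp only [List.foldl_cons, hget, Option.getD_some, Int.toNat_natCast, Nat.zero_add]
    refine ih _ _ _ _ _ (le_of_lt hlt) hb' (by split <;> omega) ?_
    rcases hfit with h | h
    · simp at h
    · rcases eq_or_ne rest [] with hr | hr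
      · exact Or.inl hr
      · right
        rw [List.dropLast_cons_of_ne_nil hr, List.filter_cons] at h
        by_cases hch : (ch != '-') = true
        · simp only [hch, if_true, List.length_cons] at h
          simp only [hch, if_true]
          push_cast at h ⊢
          omega
        · simp only [hch] at h
          simp only [hch]
          exact h

-- ===== VERDICT (by name: the statement is the Claim_ definition above) =====
theorem findProbeMap_spec : Claim_equal_findProbeMap := by
  intro al orig ps _hdom hpre
  unfold Spec_findProbeMap findProbeMap findProbeMap_alt
  simp only []
  rw [pvBuild_eq]
  have hnn : ∀ x ∈ ps.map (fun e => PySem.Str.len e), 0 ≤ x := by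
    intro x hx
    obtain ⟨e, _, rfl⟩ := List.mem_map.1 hx
    simp [PySem.Str.len_eq]
  obtain ⟨h1, h2⟩ := pvLoop_eq (ps.map fun e => PySem.Str.len e) hnn al.toList
    [] ((ps.map fun e => PySem.Str.len e).map fun _ => (0 : Int)) 0 0 0
    (Nat.zero_le _) (by simp) le_rfl
    (by rcases hpre with h | h
        · exact Or.inl h
        · right; omega)
  rw [h1, h2]
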